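-- pv_equiv track=rewrite | github.com/dcalara/right-to-healthcare | site/init_db.py | find_key_cols_year_by_row
-- ===== SOURCE A (Python) =====
-- def find_key_cols_year_by_row(grid):
--     """Finds the indices of the key columns in a csv file previously
--     converted to a list of lists (grid). Use when each year is a separate
--     row"""
--     country_name_ix = -1
--     country_code_ix = -1
--     indicator_code_ix = -1
--     year_ix = -1
--     num_cols = len(grid[0])
--     for col_ix in range(num_cols):
--         if grid[0][col_ix] == 'Country':
--             country_name_ix = col_ix
--         elif grid[0][col_ix] == 'Entity':
--             country_name_ix = col_ix
--         elif grid[0][col_ix] == 'Country_Name':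
--             country_name_ix = col_ix
--         elif grid[0][col_ix] == 'Country Name':
--             country_name_ix = col_ix
--         elif grid[0][col_ix] == 'Country_Code':
--             country_code_ix = col_ix
--         elif grid[0][col_ix] == 'Country Code':
--             country_code_ix = col_ix
--         elif grid[0][col_ix] == 'Country ISO3':
--             country_code_ix = col_ix
--         elif grid[0][col_ix] == 'Code':
--             country_code_ix = col_ix
--         elif grid[0][col_ix] == 'Indicator_Code':
--             indicator_code_ix = col_ix
--         elif grid[0][col_ix] == 'Indicator Code':
--             indicator_code_ix = col_ix
--         elif grid[0][col_ix] == 'Indicator Id':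
--             indicator_code_ix = col_ix
--         elif grid[0][col_ix] == 'Year':
--             year_ix = col_ix
--     return country_name_ix, country_code_ix, indicator_code_ix, year_ix
-- ===== SOURCE B (Python) =====
-- def find_key_cols_year_by_row(grid):
--     """Finds the indices of the key columns in a csv file previously
--     converted to a list of lists (grid). Use when each year is a separate
--     row"""
--     index = {h: i for i, h in enumerate(grid[0])}
--
--     def last(names):
--         best = -1
--         for n in names:
--             best = max(best, index.get(n, -1))
--         return best
--
--     return (last(['Country', 'Entity', 'Country_Name', 'Country Name']),
--             last(['Country_Code', 'Country Code', 'Country ISO3', 'Code']),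
--             last(['Indicator_Code', 'Indicator Code', 'Indicator Id']),
--             last(['Year']))
-- ===== Notes on version B (the rewrite author's own statement) =====
-- stated objective: simpler
-- what changed: Replaces the 12-branch if/elif scan over column indices by a one-pass header->index dictionary (last occurrence wins) followed by a max over each fixed group of accepted header names.
import Mathlib
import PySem

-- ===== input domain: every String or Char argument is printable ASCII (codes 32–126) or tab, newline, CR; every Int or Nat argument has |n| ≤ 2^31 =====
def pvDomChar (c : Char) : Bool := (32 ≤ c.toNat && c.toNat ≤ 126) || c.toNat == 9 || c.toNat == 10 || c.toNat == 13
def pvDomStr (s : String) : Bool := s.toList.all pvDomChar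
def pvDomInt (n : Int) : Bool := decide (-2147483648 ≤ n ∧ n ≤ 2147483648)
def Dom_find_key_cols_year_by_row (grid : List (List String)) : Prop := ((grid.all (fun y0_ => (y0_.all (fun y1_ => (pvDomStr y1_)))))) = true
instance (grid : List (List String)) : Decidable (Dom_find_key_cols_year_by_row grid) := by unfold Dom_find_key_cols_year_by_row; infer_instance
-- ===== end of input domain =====

-- B replaces A's 12-branch if/elif index scan by a header→index dictionary plus a max
-- over each fixed group of accepted names (objective: simpler).

-- ===== PORT A =====
-- one iteration of A's if/elif chain on the state (country_name, country_code, indicator_code, year),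
-- applied to the pair (col_ix, grid[0][col_ix])
def pvStepA (st : Int × Int × Int × Int) (p : Int × String) : Int × Int × Int × Int :=
  match st with
  | (a, b, c, d) =>
    if p.2 = "Country" then (p.1, b, c, d)
    else if p.2 = "Entity" then (p.1, b, c, d)
    else if p.2 = "Country_Name" then (p.1, b, c, d)
    else if p.2 = "Country Name" then (p.1, b, c, d)
    else if p.2 = "Country_Code" then (a, p.1, c, d)
    else if p.2 = "Country Code" then (a, p.1, c, d)
    else if p.2 = "Country ISO3" then (a, p.1, c, d)
    else if p.2 = "Code" then (a, p.1, c, d)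
    else if p.2 = "Indicator_Code" then (a, b, p.1, d)
    else if p.2 = "Indicator Code" then (a, b, p.1, d)
    else if p.2 = "Indicator Id" then (a, b, p.1, d)
    else if p.2 = "Year" then (a, b, c, p.1)
    else (a, b, c, d)

def find_key_cols_year_by_row (grid : List (List String)) : Int × Int × Int × Int :=
  (PySem.List.pyRange 0 (((grid.headD []).length : Int)) 1).foldl
    (fun st col => pvStepA st (col, PySem.List.pyGetD (grid.headD []) col "")) (-1, -1, -1, -1)

-- ===== PORT B =====
-- index = {h: i for i, h in enumerate(grid[0])}
def pvIndexOf (row : List String) : PySem.Dict String Int :=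
  (PySem.List.enumerate row).foldl (fun d p => d.insert p.2 p.1) PySem.Dict.empty

-- def last(names): best = -1; for n in names: best = max(best, index.get(n, -1)); return best
def pvLastB (index : PySem.Dict String Int) (names : List String) : Int :=
  names.foldl (fun best n => max best (index.getD n (-1))) (-1)

def find_key_cols_year_by_row_alt (grid : List (List String)) : Int × Int × Int × Int :=
  (pvLastB (pvIndexOf (grid.headD [])) ["Country", "Entity", "Country_Name", "Country Name"],
   pvLastB (pvIndexOf (grid.headD [])) ["Country_Code", "Country Code", "Country ISO3", "Code"],
   pvLastB (pvIndexOf (grid.headD [])) ["Indicator_Code", "Indicator Code", "Indicator Id"],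
   pvLastB (pvIndexOf (grid.headD [])) ["Year"])

-- ===== PRECONDITION & SPEC =====
-- Pre_ excludes only the empty grid, on which Python A (and B) raise IndexError at grid[0].
def Pre_find_key_cols_year_by_row (grid : List (List String)) : Prop := grid ≠ []
instance (grid : List (List String)) : Decidable (Pre_find_key_cols_year_by_row grid) := by
  unfold Pre_find_key_cols_year_by_row; infer_instance

def pvWitness_find_key_cols_year_by_row : List (List String) := [["Country", "Year", "Code"]]

def Spec_find_key_cols_year_by_row (grid : List (List String)) (out : Int × Int × Int × Int) : Prop := out = find_key_cols_year_by_row_alt grid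
instance (grid : List (List String)) (out : Int × Int × Int × Int) : Decidable (Spec_find_key_cols_year_by_row grid out) := by unfold Spec_find_key_cols_year_by_row; infer_instance

-- ===== CLAIM (what is proved, stated in full; the proofs are below) =====
def Claim_equal_find_key_cols_year_by_row : Prop := ∀ (grid : List (List String)), Dom_find_key_cols_year_by_row grid → Pre_find_key_cols_year_by_row grid → Spec_find_key_cols_year_by_row grid (find_key_cols_year_by_row grid)

-- ===== LEMMAS AND PROOFS =====

-- last index in row whose header belongs to g, else -1 (common characterisation of both ports)
def pvLastIdx (g : List String) (row : List String) : Int :=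
  (PySem.List.enumerate row).foldl (fun acc p => if p.2 ∈ g then p.1 else acc) (-1)

lemma pvStepA_split (st : Int × Int × Int × Int) (p : Int × String) :
    pvStepA st p =
      ((if p.2 ∈ ["Country", "Entity", "Country_Name", "Country Name"] then p.1 else st.1),
       (if p.2 ∈ ["Country_Code", "Country Code", "Country ISO3", "Code"] then p.1 else st.2.1),
       (if p.2 ∈ ["Indicator_Code", "Indicator Code", "Indicator Id"] then p.1 else st.2.2.1),
       (if p.2 ∈ ["Year"] then p.1 else st.2.2.2)) := by
  rcases st with ⟨a, b, c, d⟩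
  rcases p with ⟨i, s⟩
  by_cases h1 : s = "Country" ; · subst h1; simp [pvStepA]
  by_cases h2 : s = "Entity" ; · subst h2; simp [pvStepA]
  by_cases h3 : s = "Country_Name" ; · subst h3; simp [pvStepA]
  by_cases h4 : s = "Country Name" ; · subst h4; simp [pvStepA]
  by_cases h5 : s = "Country_Code" ; · subst h5; simp [pvStepA]
  by_cases h6 : s = "Country Code" ; · subst h6; simp [pvStepA]
  by_cases h7 : s = "Country ISO3" ; · subst h7; simp [pvStepA]
  by_cases h8 : s = "Code" ; · subst h8; simp [pvStepA]
  by_cases h9 : s = "Indicator_Code" ; · subst h9; simp [pvStepA]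
  by_cases h10 : s = "Indicator Code" ; · subst h10; simp [pvStepA]
  by_cases h11 : s = "Indicator Id" ; · subst h11; simp [pvStepA]
  by_cases h12 : s = "Year" ; · subst h12; simp [pvStepA]
  simp [pvStepA, h1, h2, h3, h4, h5, h6, h7, h8, h9, h10, h11, h12]

lemma pvFoldA_split (l : List (Int × String)) (a b c d : Int) :
    l.foldl pvStepA (a, b, c, d) =
      (l.foldl (fun acc p => if p.2 ∈ ["Country", "Entity", "Country_Name", "Country Name"] then p.1 else acc) a,
       l.foldl (fun acc p => if p.2 ∈ ["Country_Code", "Country Code", "Country ISO3", "Code"] then p.1 else acc) b,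
       l.foldl (fun acc p => if p.2 ∈ ["Indicator_Code", "Indicator Code", "Indicator Id"] then p.1 else acc) c,
       l.foldl (fun acc p => if p.2 ∈ ["Year"] then p.1 else acc) d) := by
  induction l generalizing a b c d with
  | nil => rfl
  | cons p t ih => simp only [List.foldl_cons, pvStepA_split]; exact ih _ _ _ _

lemma pvIndexOf_append (row : List String) (s : String) :
    pvIndexOf (row ++ [s]) = (pvIndexOf row).insert s (row.length : Int) := by
  simp [pvIndexOf, PySem.List.enumerate_append, List.foldl_append, PySem.List.enumerate_cons]

lemma pvIndexOf_bound (row : List String) (k : String) :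
    (pvIndexOf row).getD k (-1) ≤ (row.length : Int) - 1 := by
  induction row using List.reverseRecOn with
  | nil => simp [pvIndexOf, PySem.List.enumerate_nil, PySem.Dict.getD_empty]
  | append_singleton t s ih =>
    rw [pvIndexOf_append, PySem.Dict.getD_insert]
    by_cases h : k = s <;> simp [h, List.length_append] <;> omega

lemma pvFoldMax_le (g : List String) (f : String → Int) (init B : Int)
    (h0 : init ≤ B) (h : ∀ x ∈ g, f x ≤ B) :
    g.foldl (fun m x => max m (f x)) init ≤ B := by
  induction g generalizing init with
  | nil => simpa using h0
  | cons x t ih =>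
    simp only [List.foldl_cons]
    exact ih _ (by have := h x (by simp); omega) (fun y hy => h y (by simp [hy]))

lemma pvLastB_eq_lastIdx (g : List String) (row : List String) :
    pvLastB (pvIndexOf row) g = pvLastIdx g row := by
  induction row using List.reverseRecOn with
  | nil =>
    simp only [pvLastIdx, PySem.List.enumerate_nil, List.foldl_nil]
    have hle : pvLastB (pvIndexOf []) g ≤ -1 := by
      apply pvFoldMax_le _ _ _ _ le_rfl
      intro x _; simp [pvIndexOf, PySem.List.enumerate_nil, PySem.Dict.getD_empty]
    have hge := (PySem.List.le_foldl_max_int g (fun n => (pvIndexOf []).getD n (-1)) (-1)).1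
    simp only [pvLastB] at hle ⊢
    omega
  | append_singleton t s ih =>
    rw [pvIndexOf_append]
    have hR : pvLastIdx g (t ++ [s]) =
        if s ∈ g then (t.length : Int) else pvLastIdx g t := by
      simp [pvLastIdx, PySem.List.enumerate_append, List.foldl_append, PySem.List.enumerate_cons]
    rw [hR]
    by_cases hs : s ∈ g
    · simp only [hs, if_true]
      have hup : pvLastB ((pvIndexOf t).insert s (t.length : Int)) g ≤ (t.length : Int) := by
        apply pvFoldMax_le _ _ _ _ (by omega)
        intro x _
        rw [PySem.Dict.getD_insert]
        by_cases h : x = s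
        · simp [h]
        · simp only [h, if_false]
          have := pvIndexOf_bound t x; omega
      have hlo := (PySem.List.le_foldl_max_int g
        (fun n => ((pvIndexOf t).insert s (t.length : Int)).getD n (-1)) (-1)).2 s hs
      rw [PySem.Dict.getD_insert_self] at hlo
      simp only [pvLastB] at hup ⊢
      omega
    · simp only [hs, if_false]
      rw [← ih]
      simp only [pvLastB]
      apply PySem.List.foldl_congr_mem
      intro acc x hx
      rw [PySem.Dict.getD_insert_of_ne]
      exact fun h => hs (h ▸ hx)

lemma pvA_eq_enum (row : List String) :
    (PySem.List.pyRange 0 ((row.length : Int)) 1).foldl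
      (fun st col => pvStepA st (col, PySem.List.pyGetD row col "")) (-1, -1, -1, -1)
      = (PySem.List.enumerate row).foldl pvStepA (-1, -1, -1, -1) := by
  rw [PySem.List.enumerate_eq_map_pyRange row "", List.foldl_map]
  simp [PySem.List.len_eq]

-- ===== VERDICT (by name: the statement is the Claim_ definition above) =====
theorem find_key_cols_year_by_row_spec : Claim_equal_find_key_cols_year_by_row := by
  intro grid _ _
  show find_key_cols_year_by_row grid = find_key_cols_year_by_row_alt grid
  unfold find_key_cols_year_by_row find_key_cols_year_by_row_alt
  rw [pvA_eq_enum, pvFoldA_split]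
  rw [pvLastB_eq_lastIdx, pvLastB_eq_lastIdx, pvLastB_eq_lastIdx, pvLastB_eq_lastIdx]
  rfl
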